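-- pv_equiv track=rewrite | github.com/sandeshkhadase/Assignment-Coding-Solutions | ass27.py | string_score
-- ===== SOURCE A (Python) =====
-- def string_score(s):
--   sum = 0
--   prev_char = ""
--
--   for char in s:
--     if prev_char != "":
--       sum += abs(ord(char) - ord(prev_char))
--       prev_char = char
--     else:
--       prev_char = char
--
--   return sum
-- ===== SOURCE B (Python) =====
-- def string_score(s):
--   v = [ord(c) for c in s]
--   def solve(lo, hi):
--     # sum of |v[i] - v[i-1]| for lo < i < hi, by divide and conquer
--     if hi - lo < 2:
--       return 0
--     mid = (lo + hi) // 2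
--     return solve(lo, mid) + solve(mid, hi) + abs(v[mid] - v[mid - 1])
--   return solve(0, len(v))
-- ===== Notes on version B (the rewrite author's own statement) =====
-- stated objective: alternative
-- what changed: Replaces A's stateful single pass carrying a prev_char sentinel with a divide-and-conquer recursion over index ranges of the precomputed ord array: the score of a range is the score of its two halves plus the one bridging adjacent difference.
import Mathlib
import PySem

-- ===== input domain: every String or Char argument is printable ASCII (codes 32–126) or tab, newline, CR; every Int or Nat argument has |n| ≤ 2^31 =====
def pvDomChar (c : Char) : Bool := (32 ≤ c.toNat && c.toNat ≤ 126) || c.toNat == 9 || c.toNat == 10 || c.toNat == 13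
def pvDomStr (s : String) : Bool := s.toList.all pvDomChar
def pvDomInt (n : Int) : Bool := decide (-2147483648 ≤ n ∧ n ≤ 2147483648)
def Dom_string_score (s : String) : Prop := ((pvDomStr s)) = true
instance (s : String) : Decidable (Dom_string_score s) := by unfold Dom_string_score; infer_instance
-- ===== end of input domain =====

-- B replaces A's prev_char sentinel pass with divide-and-conquer over index ranges of the ord array (alternative decomposition, same cost).

-- ===== PORT A =====
def string_score (s : String) : Int :=
  (s.toList.foldl (fun (st : Int × Option Char) char =>
    match st.2 with
    | some prev => (st.1 + |(Int.ofNat char.toNat) - (Int.ofNat prev.toNat)|, some char)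
    | none => (st.1, some char)) (0, none)).1

-- ===== PORT B =====
-- v[mid], v[mid-1]: ported with getD 0; exact because lo+1 ≤ mid < hi ≤ v.length on every recursive call
def pySolve (v : List Int) (lo hi : Nat) : Int :=
  if _h : hi - lo < 2 then 0
  else
    pySolve v lo ((lo + hi) / 2) + pySolve v ((lo + hi) / 2) hi +
      |v.getD ((lo + hi) / 2) 0 - v.getD ((lo + hi) / 2 - 1) 0|
termination_by hi - lo
decreasing_by all_goals omega

def string_score_alt (s : String) : Int :=
  let v := s.toList.map (fun c => (Int.ofNat c.toNat))
  pySolve v 0 v.length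

-- ===== PRECONDITION & SPEC =====
def Spec_string_score (s : String) (out : Int) : Prop := out = string_score_alt s
instance (s : String) (out : Int) : Decidable (Spec_string_score s out) := by unfold Spec_string_score; infer_instance

-- ===== CLAIM (what is proved, stated in full; the proofs are below) =====
def Claim_equal_string_score : Prop := ∀ (s : String), Dom_string_score s → Spec_string_score s (string_score s)

-- ===== LEMMAS AND PROOFS =====

-- sum of adjacent absolute differences, the common characterisation of both ports
def adjI : List Int → Int
  | [] => 0
  | [_] => 0
  | a :: b :: t => |b - a| + adjI (b :: t)

def segSum (v : List Int) (lo hi : Nat) : Int :=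
  ((List.range' (lo + 1) (hi - (lo + 1))).map
    (fun i => |v.getD i 0 - v.getD (i - 1) 0|)).sum

lemma foldA_eq_adjI (l : List Char) (c : Char) (acc : Int) :
    (l.foldl (fun (st : Int × Option Char) char =>
      match st.2 with
      | some prev => (st.1 + |(Int.ofNat char.toNat) - (Int.ofNat prev.toNat)|, some char)
      | none => (st.1, some char)) (acc, some c)).1
    = acc + adjI ((c :: l).map (fun c => (Int.ofNat c.toNat))) := by
  induction l generalizing c acc with
  | nil => simp [adjI]
  | cons h t ih =>
    simp only [List.foldl]
    rw [ih h (acc + |(Int.ofNat h.toNat) - (Int.ofNat c.toNat)|)]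
    simp [adjI]; ring

lemma seg_split (v : List Int) (lo mid hi : Nat) (h1 : lo + 1 ≤ mid) (h2 : mid + 1 ≤ hi) :
    segSum v lo hi
    = segSum v lo mid + segSum v mid hi + |v.getD mid 0 - v.getD (mid - 1) 0| := by
  unfold segSum
  have e1 : hi - (lo + 1) = (mid - (lo + 1)) + (hi - mid) := by omega
  have e2 : List.range' (lo + 1) ((mid - (lo + 1)) + (hi - mid))
      = List.range' (lo + 1) (mid - (lo + 1)) ++ List.range' mid (hi - mid) := by
    have e := @List.range'_append (lo + 1) (mid - (lo + 1)) (hi - mid) 1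
    rw [(by omega : lo + 1 + 1 * (mid - (lo + 1)) = mid)] at e
    exact e.symm
  have e3 : hi - mid = (hi - (mid + 1)) + 1 := by omega
  rw [e1, e2, e3, List.range'_succ]
  simp [List.sum_append]
  ring

lemma pySolve_eq_seg (v : List Int) : ∀ (n lo hi : Nat), hi - lo ≤ n →
    pySolve v lo hi = segSum v lo hi := by
  intro n
  induction n with
  | zero =>
    intro lo hi h
    rw [pySolve, dif_pos (by omega : hi - lo < 2)]
    have : hi - (lo + 1) = 0 := by omega
    simp [segSum, this]
  | succ n ih =>
    intro lo hi h
    rw [pySolve]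
    split_ifs with h2
    · have : hi - (lo + 1) = 0 := by omega
      simp [segSum, this]
    · rw [ih lo ((lo + hi) / 2) (by omega), ih ((lo + hi) / 2) hi (by omega),
        seg_split v lo ((lo + hi) / 2) hi (by omega) (by omega)]

lemma adjI_cons_eq (v : List Int) : ∀ (a : Int),
    adjI (a :: v)
    = ((List.range' 1 v.length).map
        (fun i => |(a :: v).getD i 0 - (a :: v).getD (i - 1) 0|)).sum := by
  induction v with
  | nil => intro a; simp [adjI]
  | cons b t ih =>
    intro a
    have hlen : (b :: t).length = t.length + 1 := rfl
    rw [hlen, List.range'_succ]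
    simp only [List.map_cons, List.sum_cons]
    have hshift : List.range' 2 t.length = (List.range' 1 t.length).map (fun i => 1 + i) := by
      rw [List.map_add_range']
    rw [hshift, List.map_map]
    have hcong : ∀ i ∈ List.range' 1 t.length,
        ((fun i => |(a :: b :: t).getD i 0 - (a :: b :: t).getD (i - 1) 0|) ∘ (fun i => 1 + i)) i
        = |(b :: t).getD i 0 - (b :: t).getD (i - 1) 0| := by
      intro i hi
      have h1 : 1 ≤ i := (List.mem_range'_1.mp hi).1
      obtain ⟨j, rfl⟩ : ∃ j, i = j + 1 := ⟨i - 1, by omega⟩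
      simp [Function.comp, Nat.add_comm 1 (j + 1)]
    rw [List.map_congr_left hcong, adjI, ih b]
    simp

lemma adjI_eq_seg (v : List Int) : adjI v = segSum v 0 v.length := by
  cases v with
  | nil => simp [adjI, segSum]
  | cons a t =>
    rw [adjI_cons_eq t a]
    simp [segSum]

-- ===== VERDICT (by name: the statement is the Claim_ definition above) =====
theorem string_score_spec : Claim_equal_string_score := by
  intro s _
  unfold Spec_string_score
  have halt : string_score_alt s = adjI (s.toList.map (fun c => (Int.ofNat c.toNat))) := by
    have h0 : string_score_alt s = pySolve (s.toList.map (fun c => (Int.ofNat c.toNat))) 0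
        (s.toList.map (fun c => (Int.ofNat c.toNat))).length := rfl
    rw [h0, pySolve_eq_seg _ ((s.toList.map (fun c => (Int.ofNat c.toNat))).length) 0 _ (by omega),
      ← adjI_eq_seg]
  rw [halt]
  unfold string_score
  cases s.toList with
  | nil => simp [adjI]
  | cons c t =>
    rw [List.foldl_cons]
    simpa using foldA_eq_adjI t c 0
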